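-- pv_equiv track=rewrite | github.com/Lioninside/smarttourismindex | scripts/pipeline/06b_gtfs_reachability.py | bfs_reachability
-- ===== SOURCE A (Python) =====
-- from collections import defaultdict, deque
-- from typing import Any, Dict, List, Set, Tuple
--
-- MAX_TRAVEL_MIN  = 60
--
-- MIN_TRANSFER_MIN = 3
--
-- WINDOW_START    = 8 * 60   # 08:00 in minutes
--
-- def canonical_stop(stop_id: str, parent_map: Dict[str, str]) -> str:
--     """Return parent stop if available, otherwise return stop itself."""
--     return parent_map.get(stop_id, stop_id)
--
-- def bfs_reachability(
--     start_stop: str,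
--     stop_pos: Dict[str, Tuple[float, float]],
--     parent_map: Dict[str, str],
--     edges: Dict[str, List[Tuple[int, int, str]]],
-- ) -> Set[str]:
--     """
--     BFS from start_stop. Returns set of reachable stop_ids within MAX_TRAVEL_MIN.
--
--     State: (stop_id, earliest_arrival_min)
--     We track best known arrival per stop and expand only if we can improve.
--     """
--     # Normalise start to canonical stop
--     start = canonical_stop(start_stop, parent_map)
--
--     # best_arrival[stop_id] = earliest minute we can be at that stop
--     best_arrival: Dict[str, int] = {start: WINDOW_START}
--     queue: deque[Tuple[str, int]] = deque([(start, WINDOW_START)])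
--     reachable: Set[str] = {start}
--
--     while queue:
--         cur_stop, cur_arr = queue.popleft()
--
--         # All child stops from cur_stop (and its parent if different)
--         candidate_stops = {cur_stop}
--         parent = parent_map.get(cur_stop)
--         if parent:
--             candidate_stops.add(parent)
--
--         for from_stop in candidate_stops:
--             for dep_min, arr_min, next_stop in edges.get(from_stop, []):
--                 # Must wait at least MIN_TRANSFER_MIN after arrival before boarding
--                 if dep_min < cur_arr + MIN_TRANSFER_MIN:
--                     continue
--                 # Total elapsed from WINDOW_START must be ≤ MAX_TRAVEL_MIN
--                 elapsed = arr_min - WINDOW_START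
--                 if elapsed > MAX_TRAVEL_MIN:
--                     continue
--                 # Normalise to canonical
--                 next_canon = canonical_stop(next_stop, parent_map)
--                 if elapsed < (arr_min - best_arrival.get(next_canon, 99999)):
--                     pass
--                 if next_canon not in best_arrival or arr_min < best_arrival[next_canon]:
--                     best_arrival[next_canon] = arr_min
--                     reachable.add(next_canon)
--                     queue.append((next_canon, arr_min))
--
--     return reachable
-- ===== SOURCE B (Python) =====
-- MAX_TRAVEL_MIN = 60
--
-- MIN_TRANSFER_MIN = 3
--
-- WINDOW_START = 8 * 60
--
--
-- def bfs_reachability(start_stop, stop_pos, parent_map, edges):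
--     """Round-based fixed-point iteration (Bellman-Ford style passes over the
--     arrival-time table until stable) instead of a FIFO label-correcting queue."""
--     start = parent_map.get(start_stop, start_stop)
--     best = {start: WINDOW_START}
--     n = sum(len(es) for es in edges.values())
--     for _ in range((n + 2) * (n + 2)):
--         changed = False
--         for s, a in list(best.items()):
--             usable = list(edges.get(s, []))
--             p = parent_map.get(s)
--             if p:
--                 usable += edges.get(p, [])
--             for dep, arr, nxt in usable:
--                 if dep < a + MIN_TRANSFER_MIN or arr - WINDOW_START > MAX_TRAVEL_MIN:
--                     continue
--                 t = parent_map.get(nxt, nxt)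
--                 if t not in best or arr < best[t]:
--                     best[t] = arr
--                     changed = True
--         if not changed:
--             break
--     return set(best)
-- ===== Notes on version B (the rewrite author's own statement) =====
-- stated objective: alternative
-- what changed: Replaces A's FIFO label-correcting queue (deque of pending stops, re-expanded on every improvement) by Bellman-Ford-style global relaxation passes over the whole arrival table, iterated until a pass makes no change; both compute the same least fixpoint of earliest arrivals and return the same reachable set.
import Mathlib
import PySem

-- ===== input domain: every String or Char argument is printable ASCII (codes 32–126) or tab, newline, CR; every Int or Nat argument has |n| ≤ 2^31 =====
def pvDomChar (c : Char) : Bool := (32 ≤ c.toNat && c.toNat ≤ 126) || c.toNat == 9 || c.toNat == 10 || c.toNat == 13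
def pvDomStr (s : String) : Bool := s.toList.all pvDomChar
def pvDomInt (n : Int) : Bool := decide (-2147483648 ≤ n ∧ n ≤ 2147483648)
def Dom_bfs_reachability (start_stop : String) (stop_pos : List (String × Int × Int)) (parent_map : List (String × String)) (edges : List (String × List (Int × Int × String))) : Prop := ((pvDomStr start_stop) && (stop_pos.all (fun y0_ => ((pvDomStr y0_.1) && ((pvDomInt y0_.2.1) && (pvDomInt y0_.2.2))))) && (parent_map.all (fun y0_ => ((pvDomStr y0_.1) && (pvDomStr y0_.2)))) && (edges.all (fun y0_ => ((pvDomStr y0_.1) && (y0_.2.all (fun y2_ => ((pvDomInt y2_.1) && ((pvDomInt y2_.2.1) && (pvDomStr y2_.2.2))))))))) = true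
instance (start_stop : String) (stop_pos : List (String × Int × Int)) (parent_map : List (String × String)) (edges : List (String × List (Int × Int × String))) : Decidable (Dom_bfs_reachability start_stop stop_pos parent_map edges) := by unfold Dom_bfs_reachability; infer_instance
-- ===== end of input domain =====

-- B replaces A's FIFO label-correcting queue by round-based fixed-point passes over the arrival table (alternative algorithm, not claimed faster).
-- Both Pythons return a set (iteration order unspecified): both ports return its canonical representation, the sorted list of its
-- distinct elements.  A's `while queue:` loop is ported as fuel recursion; the fuel is a totality device only: lemma pvLoopA_post +
-- pvPhi_le_bound below prove it is never exhausted.  A's `if elapsed < (arr_min - best_arrival.get(...)): pass` is dead code (no effect)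
-- and has no counterpart.  A iterates over the ≤2-element set {cur_stop, parent} (Python set order unspecified); the port fixes the
-- order cur_stop-then-parent — the returned set is proved independent of any of these orders.

-- ===== PORT A =====
-- canonical_stop(stop_id, parent_map)
def pvCanon (pm : PySem.Dict String String) (s : String) : String :=
  (PySem.Dict.get? pm s).getD s

-- candidate_stops = {cur_stop}; parent = parent_map.get(cur_stop); if parent: candidate_stops.add(parent)
def pvCands (pm : PySem.Dict String String) (cur : String) : List String :=
  match PySem.Dict.get? pm cur with
  | some p => if p ≠ "" ∧ p ≠ cur then [cur, p] else [cur]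
  | none => [cur]

-- the nested `for from_stop in candidate_stops: for ... in edges.get(from_stop, [])` as a flatMap
def pvUsable (pm : PySem.Dict String String) (ed : PySem.Dict String (List (Int × Int × String)))
    (cur : String) : List (Int × Int × String) :=
  (pvCands pm cur).flatMap (fun fs => (PySem.Dict.get? ed fs).getD [])

-- the body of the inner loop of A, for one edge e = (dep_min, arr_min, next_stop);
-- state = (best_arrival, queue, reachable)
def pvRelaxA (pm : PySem.Dict String String) (curArr : Int)
    (st : PySem.Dict String Int × List (String × Int) × PySem.Set String)
    (e : Int × Int × String) :
    PySem.Dict String Int × List (String × Int) × PySem.Set String :=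
  if e.1 < curArr + 3 then st              -- MIN_TRANSFER_MIN = 3
  else if e.2.1 - 480 > 60 then st         -- WINDOW_START = 480, MAX_TRAVEL_MIN = 60
  else
    let t := pvCanon pm e.2.2
    match PySem.Dict.get? st.1 t with
    | none => (PySem.Dict.insert st.1 t e.2.1, st.2.1 ++ [(t, e.2.1)], PySem.Set.add st.2.2 t)
    | some w =>
        if e.2.1 < w then (PySem.Dict.insert st.1 t e.2.1, st.2.1 ++ [(t, e.2.1)], PySem.Set.add st.2.2 t)
        else st

-- `while queue: cur_stop, cur_arr = queue.popleft(); ...` (fuel recursion; fuel proven sufficient below)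
def pvLoopA (pm : PySem.Dict String String) (ed : PySem.Dict String (List (Int × Int × String))) :
    Nat → List (String × Int) → PySem.Dict String Int → PySem.Set String → PySem.Set String
  | 0, _, _, reach => reach
  | _ + 1, [], _, reach => reach
  | fuel + 1, (cur, arr) :: qs, best, reach =>
      let st := (pvUsable pm ed cur).foldl (pvRelaxA pm arr) (best, qs, reach)
      pvLoopA pm ed fuel st.2.1 st.1 st.2.2

-- sum(len(es) for es in edges.values())
def pvEdgeCount (ed : PySem.Dict String (List (Int × Int × String))) : Nat :=
  ((PySem.Dict.values ed).map List.length).sum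

def bfs_reachability (start_stop : String) (stop_pos : List (String × Int × Int)) (parent_map : List (String × String)) (edges : List (String × List (Int × Int × String))) : List String :=
  let pm : PySem.Dict String String := PySem.Dict.mk parent_map
  let ed : PySem.Dict String (List (Int × Int × String)) := PySem.Dict.mk edges
  let start := pvCanon pm start_stop
  let n := pvEdgeCount ed
  PySem.List.sorted
    (pvLoopA pm ed ((n + 2) * (n + 2) + 1) [(start, 480)]
      (PySem.Dict.mk [(start, 480)]) (PySem.Set.ofList [start]))
    (fun x => x) false

-- ===== PORT B =====
-- usable = list(edges.get(s, [])); p = parent_map.get(s); if p: usable += edges.get(p, [])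
def pvUsableB (pm : PySem.Dict String String) (ed : PySem.Dict String (List (Int × Int × String)))
    (s : String) : List (Int × Int × String) :=
  (PySem.Dict.get? ed s).getD [] ++
    (match PySem.Dict.get? pm s with
     | some p => if p ≠ "" then (PySem.Dict.get? ed p).getD [] else []
     | none => [])

-- body of B's innermost loop; state = (best, changed)
def pvRelaxB (pm : PySem.Dict String String) (a : Int)
    (st : PySem.Dict String Int × Bool) (e : Int × Int × String) :
    PySem.Dict String Int × Bool :=
  if e.1 < a + 3 ∨ e.2.1 - 480 > 60 then st
  else
    let t := pvCanon pm e.2.2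
    match PySem.Dict.get? st.1 t with
    | none => (PySem.Dict.insert st.1 t e.2.1, true)
    | some w => if e.2.1 < w then (PySem.Dict.insert st.1 t e.2.1, true) else st

-- one full pass: `changed = False; for s, a in list(best.items()): ...`
def pvPassB (pm : PySem.Dict String String) (ed : PySem.Dict String (List (Int × Int × String)))
    (best : PySem.Dict String Int) : PySem.Dict String Int × Bool :=
  (PySem.Dict.items best).foldl
    (fun st p => (pvUsableB pm ed p.1).foldl (pvRelaxB pm p.2) st) (best, false)

-- `for _ in range((n + 2) * (n + 2)): ...; if not changed: break`
def pvLoopB (pm : PySem.Dict String String) (ed : PySem.Dict String (List (Int × Int × String))) :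
    Nat → PySem.Dict String Int → PySem.Dict String Int
  | 0, best => best
  | fuel + 1, best =>
      let r := pvPassB pm ed best
      if r.2 then pvLoopB pm ed fuel r.1 else best

def bfs_reachability_alt (start_stop : String) (stop_pos : List (String × Int × Int)) (parent_map : List (String × String)) (edges : List (String × List (Int × Int × String))) : List String :=
  let pm : PySem.Dict String String := PySem.Dict.mk parent_map
  let ed : PySem.Dict String (List (Int × Int × String)) := PySem.Dict.mk edges
  let start := pvCanon pm start_stop
  let n := pvEdgeCount ed
  PySem.List.sorted
    (PySem.Set.ofList (PySem.Dict.keys (pvLoopB pm ed ((n + 2) * (n + 2)) (PySem.Dict.mk [(start, 480)]))))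
    (fun x => x) false

-- ===== PRECONDITION & SPEC =====
def Spec_bfs_reachability (start_stop : String) (stop_pos : List (String × Int × Int)) (parent_map : List (String × String)) (edges : List (String × List (Int × Int × String))) (out : List String) : Prop := out = bfs_reachability_alt start_stop stop_pos parent_map edges
instance (start_stop : String) (stop_pos : List (String × Int × Int)) (parent_map : List (String × String)) (edges : List (String × List (Int × Int × String))) (out : List String) : Decidable (Spec_bfs_reachability start_stop stop_pos parent_map edges out) := by unfold Spec_bfs_reachability; infer_instance

-- ===== CLAIM (what is proved, stated in full; the proofs are below) =====
def Claim_equal_bfs_reachability : Prop := ∀ (start_stop : String) (stop_pos : List (String × Int × Int)) (parent_map : List (String × String)) (edges : List (String × List (Int × Int × String))), Dom_bfs_reachability start_stop stop_pos parent_map edges → Spec_bfs_reachability start_stop stop_pos parent_map edges (bfs_reachability start_stop stop_pos parent_map edges)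

-- ===== LEMMAS AND PROOFS =====

inductive pvJ (pm : PySem.Dict String String) (ed : PySem.Dict String (List (Int × Int × String)))
    (startc : String) : String → Int → Prop
  | start : pvJ pm ed startc startc 480
  | step {s : String} {a : Int} {e : Int × Int × String} :
      pvJ pm ed startc s a → e ∈ pvUsable pm ed s → a + 3 ≤ e.1 → e.2.1 - 480 ≤ 60 →
      pvJ pm ed startc (pvCanon pm e.2.2) e.2.1
def pvRelaxedAt (pm : PySem.Dict String String) (ed : PySem.Dict String (List (Int × Int × String)))
    (best : PySem.Dict String Int) (s : String) (a : Int) : Prop :=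
  ∀ e ∈ pvUsable pm ed s, a + 3 ≤ e.1 → e.2.1 - 480 ≤ 60 →
    ∃ w, PySem.Dict.get? best (pvCanon pm e.2.2) = some w ∧ w ≤ e.2.1
def pvRef (b b' : PySem.Dict String Int) : Prop :=
  ∀ s v, PySem.Dict.get? b s = some v → ∃ w, PySem.Dict.get? b' s = some w ∧ w ≤ v
def pvK (pm : PySem.Dict String String) (ed : PySem.Dict String (List (Int × Int × String))) : List String :=
  (PySem.Dict.items ed).flatMap (fun kv => kv.2.map (fun e => pvCanon pm e.2.2))
def pvV (ed : PySem.Dict String (List (Int × Int × String))) : List Int :=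
  (PySem.Dict.items ed).flatMap (fun kv => kv.2.map (fun e => e.2.1))
def pvRank (V : List Int) : Option Int → Nat
  | none => V.length + 1
  | some v => V.countP (fun a => decide (a < v))
def pvPhi (pm : PySem.Dict String String) (ed : PySem.Dict String (List (Int × Int × String)))
    (best : PySem.Dict String Int) : Nat :=
  ((PySem.Set.ofList (pvK pm ed)).map (fun s => pvRank (pvV ed) (PySem.Dict.get? best s))).sum

lemma pvUsable_mem (pm : PySem.Dict String String) (ed : PySem.Dict String (List (Int × Int × String)))
    {s : String} {e : Int × Int × String} (he : e ∈ pvUsable pm ed s) :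
    pvCanon pm e.2.2 ∈ pvK pm ed ∧ e.2.1 ∈ pvV ed := by
  obtain ⟨fs, _, hmem⟩ := List.mem_flatMap.mp he
  cases hget : PySem.Dict.get? ed fs with
  | none => rw [hget] at hmem; simp at hmem
  | some l =>
    rw [hget] at hmem; simp at hmem
    have hitems : (fs, l) ∈ PySem.Dict.items ed := PySem.Dict.mem_items_of_get?_eq_some ed hget
    constructor
    · exact List.mem_flatMap.mpr ⟨(fs, l), hitems, List.mem_map.mpr ⟨e, hmem, rfl⟩⟩
    · exact List.mem_flatMap.mpr ⟨(fs, l), hitems, List.mem_map.mpr ⟨e, hmem, rfl⟩⟩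


lemma pvCountP_lt_countP (V : List Int) (v w : Int) (hv : v ∈ V) (hlt : v < w) :
    V.countP (fun a => decide (a < v)) < V.countP (fun a => decide (a < w)) := by
  induction V with
  | nil => simp at hv
  | cons a l ih =>
    rcases List.mem_cons.mp hv with rfl | hmem
    · have hmono : l.countP (fun a => decide (a < v)) ≤ l.countP (fun a => decide (a < w)) :=
        List.countP_mono_left (fun x _ h => by simp_all; omega)
      simp [hlt]
      omega
    · have := ih hmem
      simp [List.countP_cons]
      split_ifs with h1 h2 <;> omega


lemma pvRank_lt (V : List Int) (v : Int) (hv : v ∈ V) (o : Option Int)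
    (h : o = none ∨ ∃ w, o = some w ∧ v < w) : pvRank V (some v) < pvRank V o := by
  rcases h with rfl | ⟨w, rfl, hlt⟩
  · exact Nat.lt_succ_of_le (by simpa [pvRank] using List.countP_le_length (l := V))
  · exact pvCountP_lt_countP V v w hv hlt


lemma pvPhi_insert_lt (pm : PySem.Dict String String) (ed : PySem.Dict String (List (Int × Int × String)))
    (best : PySem.Dict String Int) (t : String) (v : Int)
    (ht : t ∈ pvK pm ed) (hv : v ∈ pvV ed)
    (h : PySem.Dict.get? best t = none ∨ ∃ w, PySem.Dict.get? best t = some w ∧ v < w) :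
    pvPhi pm ed (PySem.Dict.insert best t v) < pvPhi pm ed best := by
  unfold pvPhi
  apply List.sum_lt_sum
  · intro s _
    rw [PySem.Dict.get?_insert]
    split_ifs with hs
    · subst hs; exact le_of_lt (pvRank_lt (pvV ed) v hv _ h)
    · exact le_rfl
  · refine ⟨t, (PySem.Set.mem_ofList (pvK pm ed) t).mpr ht, ?_⟩
    rw [PySem.Dict.get?_insert, if_pos rfl]
    exact pvRank_lt (pvV ed) v hv _ h


lemma pvKlen (pm : PySem.Dict String String) (ed : PySem.Dict String (List (Int × Int × String))) :
    (pvK pm ed).length = pvEdgeCount ed := by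
  simp only [pvK, pvEdgeCount, PySem.Dict.values, List.length_flatMap, List.map_map]
  congr 1
  exact List.map_congr_left (fun kv _ => by simp)

lemma pvVlen (ed : PySem.Dict String (List (Int × Int × String))) :
    (pvV ed).length = pvEdgeCount ed := by
  simp only [pvV, pvEdgeCount, PySem.Dict.values, List.length_flatMap, List.map_map]
  congr 1
  exact List.map_congr_left (fun kv _ => by simp)


lemma pvPhi_le_bound (pm : PySem.Dict String String) (ed : PySem.Dict String (List (Int × Int × String)))
    (best : PySem.Dict String Int) :
    pvPhi pm ed best ≤ pvEdgeCount ed * (pvEdgeCount ed + 1) := by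
  unfold pvPhi
  calc ((PySem.Set.ofList (pvK pm ed)).map (fun s => pvRank (pvV ed) (PySem.Dict.get? best s))).sum
      ≤ ((PySem.Set.ofList (pvK pm ed)).map (fun s => pvRank (pvV ed) (PySem.Dict.get? best s))).length * ((pvV ed).length + 1) := by
        apply List.sum_le_card_nsmul
        intro x hx
        obtain ⟨s, _, rfl⟩ := List.mem_map.mp hx
        cases PySem.Dict.get? best s with
        | none => simp [pvRank]
        | some w => simpa [pvRank] using Nat.le_succ_of_le (List.countP_le_length)
    _ ≤ (pvK pm ed).length * ((pvV ed).length + 1) := by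
        simp only [List.length_map]
        exact Nat.mul_le_mul_right _ (PySem.Set.length_ofList_le (xs := pvK pm ed))
    _ = pvEdgeCount ed * (pvEdgeCount ed + 1) := by rw [pvKlen, pvVlen]


lemma pvRef_trans {b1 b2 b3 : PySem.Dict String Int} (x1 : pvRef b1 b2) (x2 : pvRef b2 b3) : pvRef b1 b3 := by
  intro s v hv
  obtain ⟨w, hw, hwle⟩ := x1 s v hv
  obtain ⟨u, hu, hule⟩ := x2 s w hw
  exact ⟨u, hu, le_trans hule hwle⟩


lemma pvRelaxedAt_mono (pm : PySem.Dict String String) (ed : PySem.Dict String (List (Int × Int × String)))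
    {b b' : PySem.Dict String Int} (href : pvRef b b') {s : String} {a : Int}
    (h : pvRelaxedAt pm ed b s a) : pvRelaxedAt pm ed b' s a := by
  intro e he h1 h2
  obtain ⟨w, hw, hwle⟩ := h e he h1 h2
  obtain ⟨u, hu, hule⟩ := href _ _ hw
  exact ⟨u, hu, le_trans hule hwle⟩
structure pvAMid (pm : PySem.Dict String String) (ed : PySem.Dict String (List (Int × Int × String)))
    (startc : String) (cur : String) (arr : Int)
    (st : PySem.Dict String Int × List (String × Int) × PySem.Set String) : Prop where
  sound : ∀ s v, PySem.Dict.get? st.1 s = some v → pvJ pm ed startc s v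
  soundq : ∀ p ∈ st.2.1, pvJ pm ed startc p.1 p.2
  closure : ∀ s v, PySem.Dict.get? st.1 s = some v →
    (s, v) ∈ st.2.1 ∨ pvRelaxedAt pm ed st.1 s v ∨ (s = cur ∧ v = arr)
  startE : ∃ v, v ≤ 480 ∧ PySem.Dict.get? st.1 startc = some v
  reachIff : ∀ x, x ∈ st.2.2 ↔ ∃ v, PySem.Dict.get? st.1 x = some v
  reachNd : st.2.2.Nodup


lemma pvStepA (pm : PySem.Dict String String) (ed : PySem.Dict String (List (Int × Int × String)))
    (startc cur : String) (arr : Int) (e : Int × Int × String)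
    (st : PySem.Dict String Int × List (String × Int) × PySem.Set String)
    (he : e ∈ pvUsable pm ed cur) (hJ : pvJ pm ed startc cur arr)
    (h : pvAMid pm ed startc cur arr st) :
    pvAMid pm ed startc cur arr (pvRelaxA pm arr st e) ∧
    pvRef st.1 (pvRelaxA pm arr st e).1 ∧
    (∀ p ∈ st.2.1, p ∈ (pvRelaxA pm arr st e).2.1) ∧
    (arr + 3 ≤ e.1 → e.2.1 - 480 ≤ 60 →
      ∃ w, PySem.Dict.get? (pvRelaxA pm arr st e).1 (pvCanon pm e.2.2) = some w ∧ w ≤ e.2.1) ∧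
    (pvPhi pm ed (pvRelaxA pm arr st e).1 + (pvRelaxA pm arr st e).2.1.length ≤
      pvPhi pm ed st.1 + st.2.1.length) := by
  have hrefl : pvRef st.1 st.1 := fun s v hv => ⟨v, hv, le_rfl⟩
  unfold pvRelaxA
  split_ifs with h1 h2
  · -- dep too early: no-op
    exact ⟨h, hrefl, fun p hp => hp, fun ha _ => absurd h1 (by omega), le_rfl⟩
  · -- elapsed too big: no-op
    exact ⟨h, hrefl, fun p hp => hp, fun _ hb => absurd h2 (by omega), le_rfl⟩
  · -- boardable
    have hdep : arr + 3 ≤ e.1 := by omega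
    have helap : e.2.1 - 480 ≤ 60 := by omega
    have hJt : pvJ pm ed startc (pvCanon pm e.2.2) e.2.1 := pvJ.step hJ he hdep helap
    set t := pvCanon pm e.2.2 with htdef
    -- common facts for the insert case
    have main : ∀ (hcase : PySem.Dict.get? st.1 t = none ∨
          ∃ w, PySem.Dict.get? st.1 t = some w ∧ e.2.1 < w),
        pvAMid pm ed startc cur arr
          (PySem.Dict.insert st.1 t e.2.1, st.2.1 ++ [(t, e.2.1)], PySem.Set.add st.2.2 t) ∧
        pvRef st.1 (PySem.Dict.insert st.1 t e.2.1) ∧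
        (∀ p ∈ st.2.1, p ∈ st.2.1 ++ [(t, e.2.1)]) ∧
        (arr + 3 ≤ e.1 → e.2.1 - 480 ≤ 60 →
          ∃ w, PySem.Dict.get? (PySem.Dict.insert st.1 t e.2.1) t = some w ∧ w ≤ e.2.1) ∧
        (pvPhi pm ed (PySem.Dict.insert st.1 t e.2.1) + (st.2.1 ++ [(t, e.2.1)]).length ≤
          pvPhi pm ed st.1 + st.2.1.length) := by
      intro hcase
      have href : pvRef st.1 (PySem.Dict.insert st.1 t e.2.1) := by
        intro s v hv
        rw [PySem.Dict.get?_insert]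
        split_ifs with hs
        · subst hs
          rcases hcase with hnone | ⟨w, hw, hlt⟩
          · rw [hv] at hnone; cases hnone
          · rw [hv] at hw; cases hw
            exact ⟨e.2.1, rfl, le_of_lt hlt⟩
        · exact ⟨v, hv, le_rfl⟩
      have hphi : pvPhi pm ed (PySem.Dict.insert st.1 t e.2.1) < pvPhi pm ed st.1 :=
        pvPhi_insert_lt pm ed st.1 t e.2.1 (pvUsable_mem pm ed he).1 (pvUsable_mem pm ed he).2 hcase
      refine ⟨⟨?_, ?_, ?_, ?_, ?_, ?_⟩, href, fun p hp => List.mem_append_left _ hp, ?_, ?_⟩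
      · -- sound
        intro s v hv
        rw [PySem.Dict.get?_insert] at hv
        split_ifs at hv with hs
        · cases hv; subst hs; exact hJt
        · exact h.sound s v hv
      · -- soundq
        intro p hp
        rcases List.mem_append.mp hp with hp | hp
        · exact h.soundq p hp
        · simp at hp; subst hp; exact hJt
      · -- closure
        intro s v hv
        rw [PySem.Dict.get?_insert] at hv
        split_ifs at hv with hs
        · cases hv; subst hs
          exact Or.inl (List.mem_append_right _ (by simp))
        · rcases h.closure s v hv with hq | hr | hc
          · exact Or.inl (List.mem_append_left _ hq)
          · exact Or.inr (Or.inl (pvRelaxedAt_mono pm ed href hr))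
          · exact Or.inr (Or.inr hc)
      · -- startE
        obtain ⟨v, hle, hv⟩ := h.startE
        obtain ⟨w, hw, hwle⟩ := href _ _ hv
        exact ⟨w, le_trans hwle hle, hw⟩
      · -- reachIff
        intro x
        rw [PySem.Set.mem_add, h.reachIff x, PySem.Dict.get?_insert]
        constructor
        · rintro (⟨v, hv⟩ | rfl)
          · by_cases hx : x = t
            · exact ⟨e.2.1, by simp [hx]⟩
            · exact ⟨v, by simp [hx, hv]⟩
          · exact ⟨e.2.1, by simp⟩
        · rintro ⟨v, hv⟩
          split_ifs at hv with hx
          · exact Or.inr hx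
          · exact Or.inl ⟨v, hv⟩
      · -- reachNd
        exact PySem.Set.nodup_add _ _ h.reachNd
      · -- progress
        intro _ _
        exact ⟨e.2.1, PySem.Dict.get?_insert_self st.1 t e.2.1, le_rfl⟩
      · -- measure
        simp only [List.length_append, List.length_cons, List.length_nil]
        omega
    cases hget : PySem.Dict.get? st.1 t with
    | none =>
      simpa [hget] using main (Or.inl hget)
    | some w =>
      by_cases hlt : e.2.1 < w
      · simpa [hget, hlt] using main (Or.inr ⟨w, hget, hlt⟩)
      · -- already good: no-op, witness w
        simp only [hget, if_neg hlt]
        exact ⟨h, hrefl, fun p hp => hp, fun _ _ => ⟨w, rfl, by omega⟩, le_rfl⟩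


structure pvAState (pm : PySem.Dict String String) (ed : PySem.Dict String (List (Int × Int × String)))
    (startc : String) (best : PySem.Dict String Int) (q : List (String × Int)) (reach : PySem.Set String) : Prop where
  sound : ∀ s v, PySem.Dict.get? best s = some v → pvJ pm ed startc s v
  soundq : ∀ p ∈ q, pvJ pm ed startc p.1 p.2
  closure : ∀ s v, PySem.Dict.get? best s = some v → (s, v) ∈ q ∨ pvRelaxedAt pm ed best s v
  startE : ∃ v, v ≤ 480 ∧ PySem.Dict.get? best startc = some v
  reachIff : ∀ x, x ∈ reach ↔ ∃ v, PySem.Dict.get? best x = some v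
  reachNd : reach.Nodup


lemma pvFoldA (pm : PySem.Dict String String) (ed : PySem.Dict String (List (Int × Int × String)))
    (startc cur : String) (arr : Int) (l : List (Int × Int × String)) :
    ∀ (st : PySem.Dict String Int × List (String × Int) × PySem.Set String),
    (∀ e ∈ l, e ∈ pvUsable pm ed cur) → pvJ pm ed startc cur arr →
    pvAMid pm ed startc cur arr st →
    pvAMid pm ed startc cur arr (l.foldl (pvRelaxA pm arr) st) ∧
    pvRef st.1 (l.foldl (pvRelaxA pm arr) st).1 ∧
    (∀ p ∈ st.2.1, p ∈ (l.foldl (pvRelaxA pm arr) st).2.1) ∧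
    (∀ e ∈ l, arr + 3 ≤ e.1 → e.2.1 - 480 ≤ 60 →
      ∃ w, PySem.Dict.get? (l.foldl (pvRelaxA pm arr) st).1 (pvCanon pm e.2.2) = some w ∧ w ≤ e.2.1) ∧
    (pvPhi pm ed (l.foldl (pvRelaxA pm arr) st).1 + (l.foldl (pvRelaxA pm arr) st).2.1.length ≤
      pvPhi pm ed st.1 + st.2.1.length) := by
  induction l with
  | nil =>
    intro st _ _ h
    exact ⟨h, fun s v hv => ⟨v, hv, le_rfl⟩, fun p hp => hp, by simp, le_rfl⟩
  | cons e l ih =>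
    intro st hl hJ h
    obtain ⟨h1, href1, hq1, hprog1, hphi1⟩ :=
      pvStepA pm ed startc cur arr e st (hl e (by simp)) hJ h
    obtain ⟨h2, href2, hq2, hprog2, hphi2⟩ :=
      ih (pvRelaxA pm arr st e) (fun e' he' => hl e' (by simp [he'])) hJ h1
    simp only [List.foldl_cons]
    refine ⟨h2, pvRef_trans href1 href2, fun p hp => hq2 _ (hq1 p hp), ?_, by omega⟩
    intro e' he' ha hb
    rcases List.mem_cons.mp he' with rfl | hmem
    · obtain ⟨w, hw, hwle⟩ := hprog1 ha hb
      obtain ⟨u, hu, hule⟩ := href2 _ _ hw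
      exact ⟨u, hu, le_trans hule hwle⟩
    · exact hprog2 e' hmem ha hb


lemma pvLoopA_post (pm : PySem.Dict String String) (ed : PySem.Dict String (List (Int × Int × String)))
    (startc : String) :
    ∀ (fuel : Nat) (q : List (String × Int)) (best : PySem.Dict String Int) (reach : PySem.Set String),
    pvAState pm ed startc best q reach → pvPhi pm ed best + q.length < fuel →
    ∃ bf : PySem.Dict String Int,
      (∀ s v, PySem.Dict.get? bf s = some v → pvJ pm ed startc s v) ∧
      (∀ s v, PySem.Dict.get? bf s = some v → pvRelaxedAt pm ed bf s v) ∧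
      (∃ v, v ≤ 480 ∧ PySem.Dict.get? bf startc = some v) ∧
      (∀ x, x ∈ pvLoopA pm ed fuel q best reach ↔ ∃ v, PySem.Dict.get? bf x = some v) ∧
      (pvLoopA pm ed fuel q best reach).Nodup := by
  intro fuel
  induction fuel with
  | zero => intro q best reach _ hM; omega
  | succ n ih =>
    intro q best reach hst hM
    match q with
    | [] =>
      refine ⟨best, hst.sound, ?_, hst.startE, hst.reachIff, hst.reachNd⟩
      intro s v hv
      rcases hst.closure s v hv with hq | hr
      · simp at hq
      · exact hr
    | (cur, arr) :: qs =>
      have hJc : pvJ pm ed startc cur arr := hst.soundq (cur, arr) (by simp)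
      have hmid : pvAMid pm ed startc cur arr (best, qs, reach) := by
        refine ⟨hst.sound, fun p hp => hst.soundq p (by simp [hp]), ?_, hst.startE, hst.reachIff, hst.reachNd⟩
        intro s v hv
        rcases hst.closure s v hv with hq | hr
        · rcases List.mem_cons.mp hq with heq | hmem
          · right; right; exact ⟨congrArg Prod.fst heq, congrArg Prod.snd heq⟩
          · exact Or.inl hmem
        · exact Or.inr (Or.inl hr)
      obtain ⟨hmid', href, hq, hprog, hphi⟩ :=
        pvFoldA pm ed startc cur arr (pvUsable pm ed cur) (best, qs, reach)
          (fun e he => he) hJc hmid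
      set st := (pvUsable pm ed cur).foldl (pvRelaxA pm arr) (best, qs, reach) with hstdef
      have hst' : pvAState pm ed startc st.1 st.2.1 st.2.2 := by
        refine ⟨hmid'.sound, hmid'.soundq, ?_, hmid'.startE, hmid'.reachIff, hmid'.reachNd⟩
        intro s v hv
        rcases hmid'.closure s v hv with hq' | hr | ⟨rfl, rfl⟩
        · exact Or.inl hq'
        · exact Or.inr hr
        · right
          intro e he ha hb
          exact hprog e he ha hb
      have hphi' : pvPhi pm ed st.1 + st.2.1.length ≤ pvPhi pm ed best + qs.length := by
        simpa using hphi
      have hM' : pvPhi pm ed st.1 + st.2.1.length < n := by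
        simp only [List.length_cons] at hM
        omega
      obtain ⟨bf, hb1, hb2, hb3, hb4, hb5⟩ := ih st.2.1 st.1 st.2.2 hst' hM'
      exact ⟨bf, hb1, hb2, hb3, by simpa [pvLoopA, ← hstdef] using hb4, by simpa [pvLoopA, ← hstdef] using hb5⟩


lemma pvUsableB_iff (pm : PySem.Dict String String) (ed : PySem.Dict String (List (Int × Int × String)))
    (s : String) (e : Int × Int × String) : e ∈ pvUsableB pm ed s ↔ e ∈ pvUsable pm ed s := by
  unfold pvUsableB pvUsable pvCands
  cases hget : PySem.Dict.get? pm s with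
  | none => simp
  | some p =>
    by_cases hp : p = ""
    · simp [hp]
    · by_cases hps : p = s
      · subst hps; simp [hp]
      · simp [hp, hps]


structure pvBState (pm : PySem.Dict String String) (ed : PySem.Dict String (List (Int × Int × String)))
    (startc : String) (best : PySem.Dict String Int) : Prop where
  sound : ∀ s v, PySem.Dict.get? best s = some v → pvJ pm ed startc s v
  startE : ∃ v, v ≤ 480 ∧ PySem.Dict.get? best startc = some v
  keysNd : (PySem.Dict.keys best).Nodup

structure pvBMid (pm : PySem.Dict String String) (ed : PySem.Dict String (List (Int × Int × String)))
    (startc : String) (best0 : PySem.Dict String Int) (st : PySem.Dict String Int × Bool) : Prop where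
  bst : pvBState pm ed startc st.1
  phile : pvPhi pm ed st.1 ≤ pvPhi pm ed best0
  phiTrue : st.2 = true → pvPhi pm ed st.1 < pvPhi pm ed best0
  unchanged : st.2 = false → st.1 = best0



lemma pvStepB (pm : PySem.Dict String String) (ed : PySem.Dict String (List (Int × Int × String)))
    (startc s : String) (a : Int) (e : Int × Int × String)
    (best0 : PySem.Dict String Int) (st : PySem.Dict String Int × Bool)
    (he : e ∈ pvUsable pm ed s) (hJ : pvJ pm ed startc s a)
    (h : pvBMid pm ed startc best0 st) :
    pvBMid pm ed startc best0 (pvRelaxB pm a st e) ∧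
    pvRef st.1 (pvRelaxB pm a st e).1 ∧
    ((pvRelaxB pm a st e).2 = false → pvRelaxB pm a st e = st ∧
      (a + 3 ≤ e.1 → e.2.1 - 480 ≤ 60 →
        ∃ w, PySem.Dict.get? st.1 (pvCanon pm e.2.2) = some w ∧ w ≤ e.2.1)) := by
  have hrefl : pvRef st.1 st.1 := fun s v hv => ⟨v, hv, le_rfl⟩
  unfold pvRelaxB
  split_ifs with h1
  · refine ⟨h, hrefl, fun _ => ⟨rfl, ?_⟩⟩
    intro ha hb
    exfalso; rcases h1 with h1 | h1 <;> omega
  · push Not at h1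
    have hdep : a + 3 ≤ e.1 := by omega
    have helap : e.2.1 - 480 ≤ 60 := by omega
    have hJt : pvJ pm ed startc (pvCanon pm e.2.2) e.2.1 := pvJ.step hJ he hdep helap
    set t := pvCanon pm e.2.2 with htdef
    have main : ∀ (hcase : PySem.Dict.get? st.1 t = none ∨
          ∃ w, PySem.Dict.get? st.1 t = some w ∧ e.2.1 < w),
        pvBMid pm ed startc best0 (PySem.Dict.insert st.1 t e.2.1, true) ∧
        pvRef st.1 (PySem.Dict.insert st.1 t e.2.1) := by
      intro hcase
      have href : pvRef st.1 (PySem.Dict.insert st.1 t e.2.1) := by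
        intro x v hv
        rw [PySem.Dict.get?_insert]
        split_ifs with hx
        · subst hx
          rcases hcase with hnone | ⟨w, hw, hlt⟩
          · rw [hv] at hnone; cases hnone
          · rw [hv] at hw; cases hw
            exact ⟨e.2.1, rfl, le_of_lt hlt⟩
        · exact ⟨v, hv, le_rfl⟩
      have hphi : pvPhi pm ed (PySem.Dict.insert st.1 t e.2.1) < pvPhi pm ed st.1 :=
        pvPhi_insert_lt pm ed st.1 t e.2.1 (pvUsable_mem pm ed he).1 (pvUsable_mem pm ed he).2 hcase
      refine ⟨⟨⟨?_, ?_, ?_⟩, ?_, ?_, ?_⟩, href⟩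
      · intro x v hv
        rw [PySem.Dict.get?_insert] at hv
        split_ifs at hv with hx
        · cases hv; subst hx; exact hJt
        · exact h.bst.sound x v hv
      · obtain ⟨v, hle, hv⟩ := h.bst.startE
        obtain ⟨w, hw, hwle⟩ := href _ _ hv
        exact ⟨w, le_trans hwle hle, hw⟩
      · exact PySem.Dict.nodup_keys_insert _ _ _ h.bst.keysNd
      · exact le_of_lt (lt_of_lt_of_le hphi h.phile)
      · intro _; exact lt_of_lt_of_le hphi h.phile
      · intro hfalse; cases hfalse
    cases hget : PySem.Dict.get? st.1 t with
    | none =>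
      obtain ⟨hm, hr⟩ := main (Or.inl hget)
      refine ⟨by simpa [hget] using hm, by simpa [hget] using hr, ?_⟩
      simp [hget]
    | some w =>
      by_cases hlt : e.2.1 < w
      · obtain ⟨hm, hr⟩ := main (Or.inr ⟨w, hget, hlt⟩)
        refine ⟨by simpa [hget, hlt] using hm, by simpa [hget, hlt] using hr, ?_⟩
        simp [hget, hlt]
      · simp only [hget, if_neg hlt]
        exact ⟨h, hrefl, fun _ => ⟨by simp, fun _ _ => ⟨w, by simp, by omega⟩⟩⟩

lemma pvFoldB_edges (pm : PySem.Dict String String) (ed : PySem.Dict String (List (Int × Int × String)))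
    (startc s : String) (a : Int) (l : List (Int × Int × String)) :
    ∀ (best0 : PySem.Dict String Int) (st : PySem.Dict String Int × Bool),
    (∀ e ∈ l, e ∈ pvUsable pm ed s) → pvJ pm ed startc s a →
    pvBMid pm ed startc best0 st →
    pvBMid pm ed startc best0 (l.foldl (pvRelaxB pm a) st) ∧
    pvRef st.1 (l.foldl (pvRelaxB pm a) st).1 ∧
    ((l.foldl (pvRelaxB pm a) st).2 = false → l.foldl (pvRelaxB pm a) st = st ∧
      (∀ e ∈ l, a + 3 ≤ e.1 → e.2.1 - 480 ≤ 60 →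
        ∃ w, PySem.Dict.get? st.1 (pvCanon pm e.2.2) = some w ∧ w ≤ e.2.1)) := by
  induction l with
  | nil =>
    intro best0 st _ _ h
    exact ⟨h, fun x v hv => ⟨v, hv, le_rfl⟩, fun _ => ⟨rfl, by simp⟩⟩
  | cons e l ih =>
    intro best0 st hl hJ h
    obtain ⟨h1, href1, hf1⟩ := pvStepB pm ed startc s a e best0 st (hl e (by simp)) hJ h
    obtain ⟨h2, href2, hf2⟩ := ih best0 (pvRelaxB pm a st e) (fun e' he' => hl e' (by simp [he'])) hJ h1
    simp only [List.foldl_cons]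
    refine ⟨h2, pvRef_trans href1 href2, ?_⟩
    intro hfl
    obtain ⟨heq2, hrel2⟩ := hf2 hfl
    have hflag1 : (pvRelaxB pm a st e).2 = false := by rw [heq2] at hfl; exact hfl
    obtain ⟨heq1, hprog1⟩ := hf1 hflag1
    rw [heq2, heq1]
    refine ⟨rfl, ?_⟩
    intro e' he' ha hb
    rcases List.mem_cons.mp he' with rfl | hmem
    · exact hprog1 ha hb
    · have := hrel2 e' hmem ha hb
      rw [heq1] at this
      exact this

lemma pvFoldB_items (pm : PySem.Dict String String) (ed : PySem.Dict String (List (Int × Int × String)))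
    (startc : String) (l : List (String × Int)) :
    ∀ (best0 : PySem.Dict String Int) (st : PySem.Dict String Int × Bool),
    (∀ p ∈ l, pvJ pm ed startc p.1 p.2) →
    pvBMid pm ed startc best0 st →
    pvBMid pm ed startc best0
      (l.foldl (fun st p => (pvUsableB pm ed p.1).foldl (pvRelaxB pm p.2) st) st) ∧
    ((l.foldl (fun st p => (pvUsableB pm ed p.1).foldl (pvRelaxB pm p.2) st) st).2 = false →
      (l.foldl (fun st p => (pvUsableB pm ed p.1).foldl (pvRelaxB pm p.2) st) st) = st ∧
      ∀ p ∈ l, pvRelaxedAt pm ed st.1 p.1 p.2) := by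
  induction l with
  | nil =>
    intro best0 st _ h
    exact ⟨h, fun _ => ⟨rfl, by simp⟩⟩
  | cons p l ih =>
    intro best0 st hJ h
    obtain ⟨h1, href1, hf1⟩ :=
      pvFoldB_edges pm ed startc p.1 p.2 (pvUsableB pm ed p.1) best0 st
        (fun e he => (pvUsableB_iff pm ed p.1 e).mp he) (hJ p (by simp)) h
    obtain ⟨h2, hf2⟩ := ih best0 _ (fun p' hp' => hJ p' (by simp [hp'])) h1
    simp only [List.foldl_cons]
    refine ⟨h2, ?_⟩
    intro hfl
    obtain ⟨heq2, hrel2⟩ := hf2 hfl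
    have hflag1 : ((pvUsableB pm ed p.1).foldl (pvRelaxB pm p.2) st).2 = false := by
      rw [heq2] at hfl; exact hfl
    obtain ⟨heq1, hprog1⟩ := hf1 hflag1
    rw [heq2, heq1]
    refine ⟨rfl, ?_⟩
    intro p' hp'
    rcases List.mem_cons.mp hp' with rfl | hmem
    · intro e he ha hb
      exact hprog1 e ((pvUsableB_iff pm ed p'.1 e).mpr he) ha hb
    · have := hrel2 p' hmem
      rw [heq1] at this
      exact this

lemma pvLoopB_post (pm : PySem.Dict String String) (ed : PySem.Dict String (List (Int × Int × String)))
    (startc : String) :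
    ∀ (fuel : Nat) (best : PySem.Dict String Int),
    pvBState pm ed startc best → pvPhi pm ed best < fuel →
    pvBState pm ed startc (pvLoopB pm ed fuel best) ∧
    (∀ s v, PySem.Dict.get? (pvLoopB pm ed fuel best) s = some v →
      pvRelaxedAt pm ed (pvLoopB pm ed fuel best) s v) := by
  intro fuel
  induction fuel with
  | zero => intro best _ hM; omega
  | succ n ih =>
    intro best hst hM
    have hJitems : ∀ p ∈ PySem.Dict.items best, pvJ pm ed startc p.1 p.2 := by
      intro p hp
      exact hst.sound p.1 p.2 (PySem.Dict.get?_of_mem_items best (by simpa using hp) hst.keysNd)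
    have hmid : pvBMid pm ed startc best (best, false) :=
      ⟨hst, le_rfl, fun h => absurd h (by simp), fun _ => rfl⟩
    obtain ⟨hm, hfl⟩ := pvFoldB_items pm ed startc (PySem.Dict.items best) best (best, false) hJitems hmid
    by_cases hch : (pvPassB pm ed best).2 = true
    · have hphi : pvPhi pm ed (pvPassB pm ed best).1 < pvPhi pm ed best := hm.phiTrue hch
      have := ih (pvPassB pm ed best).1 hm.bst (by omega)
      simpa [pvLoopB, hch] using this
    · simp only [Bool.not_eq_true] at hch
      obtain ⟨heq, hrel⟩ := hfl hch
      have hres : pvLoopB pm ed (n + 1) best = best := by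
        simp [pvLoopB, hch]
      rw [hres]
      refine ⟨hst, ?_⟩
      intro s v hv
      exact hrel (s, v) (PySem.Dict.mem_items_of_get?_eq_some best hv)

lemma pvComplete (pm : PySem.Dict String String) (ed : PySem.Dict String (List (Int × Int × String)))
    (startc : String) (best : PySem.Dict String Int)
    (hfix : ∀ s v, PySem.Dict.get? best s = some v → pvRelaxedAt pm ed best s v)
    (hst : ∃ v, v ≤ 480 ∧ PySem.Dict.get? best startc = some v) :
    ∀ s a, pvJ pm ed startc s a → ∃ v, PySem.Dict.get? best s = some v ∧ v ≤ a := by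
  intro s a hJ
  induction hJ with
  | start =>
    obtain ⟨v, hle, hv⟩ := hst
    exact ⟨v, hv, hle⟩
  | @step s' a' e hJ' he ha hb ih =>
    obtain ⟨v, hv, hvle⟩ := ih
    obtain ⟨w, hw, hwle⟩ := hfix s' v hv e he (by omega) hb
    exact ⟨w, hw, hwle⟩


lemma pvGet_singleton (k : String) (v : Int) (s : String) :
    PySem.Dict.get? (PySem.Dict.mk [(k, v)]) s = if k = s then some v else none := by
  rw [PySem.Dict.get?_mk_cons]
  simp [PySem.Dict.get?]


lemma pvMem_keys_iff (d : PySem.Dict String Int) (hnd : (PySem.Dict.keys d).Nodup) (k : String) :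
    k ∈ PySem.Dict.keys d ↔ ∃ v, PySem.Dict.get? d k = some v := by
  constructor
  · intro h
    obtain ⟨p, hp, hk⟩ := List.mem_map.mp h
    exact ⟨p.2, by rw [← hk]; exact PySem.Dict.get?_of_mem_items d (by simpa using hp) hnd⟩
  · rintro ⟨v, hv⟩
    exact List.mem_map.mpr ⟨(k, v), PySem.Dict.mem_items_of_get?_eq_some d hv, rfl⟩

-- ===== VERDICT (by name: the statement is the Claim_ definition above) =====
theorem bfs_reachability_spec : Claim_equal_bfs_reachability := by
  intro start_stop stop_pos parent_map edges _
  unfold Spec_bfs_reachability bfs_reachability bfs_reachability_alt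
  simp only []
  set pm := PySem.Dict.mk parent_map with hpm
  set ed := PySem.Dict.mk edges with hed
  set startc := pvCanon pm start_stop with hstartc
  set n := pvEdgeCount ed with hn
  set d0 : PySem.Dict String Int := PySem.Dict.mk [(startc, 480)] with hd0
  have hget0 : ∀ s, PySem.Dict.get? d0 s = if startc = s then some 480 else none :=
    pvGet_singleton startc 480
  have hsound0 : ∀ s v, PySem.Dict.get? d0 s = some v → pvJ pm ed startc s v := by
    intro s v hv
    rw [hget0] at hv
    split_ifs at hv with hs
    cases hv; subst hs; exact pvJ.start
  have hstartE0 : ∃ v, v ≤ 480 ∧ PySem.Dict.get? d0 startc = some v :=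
    ⟨480, le_rfl, by rw [hget0]; simp⟩
  have hphi0 : pvPhi pm ed d0 ≤ n * (n + 1) := pvPhi_le_bound pm ed d0
  have hnn : n * (n + 1) + 2 ≤ (n + 2) * (n + 2) := by nlinarith
  -- run A
  have hstA : pvAState pm ed startc d0 [(startc, 480)] (PySem.Set.ofList [startc]) := by
    refine ⟨hsound0, ?_, ?_, hstartE0, ?_, PySem.Set.nodup_ofList _⟩
    · intro p hp
      simp at hp
      subst hp
      exact pvJ.start
    · intro s v hv
      rw [hget0] at hv
      split_ifs at hv with hs
      cases hv; exact Or.inl (by simp [hs])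
    · intro x
      rw [PySem.Set.mem_ofList, hget0]
      constructor
      · intro hx
        simp at hx
        subst hx
        exact ⟨480, by simp⟩
      · rintro ⟨v, hv⟩
        split_ifs at hv with hs
        simp [hs]
  obtain ⟨bfA, hA1, hA2, hA3, hA4, hA5⟩ :=
    pvLoopA_post pm ed startc ((n + 2) * (n + 2) + 1) [(startc, 480)] d0
      (PySem.Set.ofList [startc]) hstA (by simp only [List.length_cons, List.length_nil]; omega)
  -- run B
  have hstB : pvBState pm ed startc d0 := by
    refine ⟨hsound0, hstartE0, ?_⟩
    rw [hd0, PySem.Dict.keys_mk]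
    simp
  obtain ⟨hB1, hB2⟩ :=
    pvLoopB_post pm ed startc ((n + 2) * (n + 2)) d0 hstB (by omega)
  -- the two result sets are equal, hence their sorted lists are equal
  apply PySem.List.sorted_eq_sorted_of_perm _ _ _ (fun a b h => h)
  rw [List.perm_ext_iff_of_nodup hA5 (PySem.Set.nodup_ofList _)]
  intro x
  rw [hA4 x, PySem.Set.mem_ofList, pvMem_keys_iff _ hB1.keysNd]
  constructor
  · rintro ⟨v, hv⟩
    obtain ⟨w, hw, _⟩ := pvComplete pm ed startc _ hB2 hB1.startE x v (hA1 x v hv)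
    exact ⟨w, hw⟩
  · rintro ⟨v, hv⟩
    obtain ⟨w, hw, _⟩ := pvComplete pm ed startc bfA hA2 hA3 x v (hB1.sound x v hv)
    exact ⟨w, hw⟩
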